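-- pv_equiv track=rewrite | github.com/catlee/adventofcode | 2019/python/8/8.py | render_layers
-- ===== SOURCE A (Python) =====
-- def render_layers(width, height, layers):
--     retval = ""
--     for y in range(height):
--         for x in range(width):
--             pos = (y * width) + x
--             for layer in layers:
--                 if layer[pos] == "0":
--                     retval += " "
--                     break
--                 elif layer[pos] == "1":
--                     retval += "*"
--                     break
--                 elif layer[pos] == "2":
--                     continue
--             else:
--                 retval += "?"
--         retval += "\n"
--     return retval
-- ===== SOURCE B (Python) =====
-- def render_layers(width, height, layers):
--     # Paint back-to-front into a flat buffer: the topmost non-transparent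
--     # pixel wins because the first layer is painted last.
--     n = width * height if width > 0 and height > 0 else 0
--     buf = ["?"] * n
--     for layer in reversed(layers):
--         buf = [" " if c == "0" else "*" if c == "1" else old
--                for old, c in zip(buf, layer)]
--     rows = []
--     for y in range(height):
--         rows.append("".join(buf[y * width:(y + 1) * width]))
--         rows.append("\n")
--     return "".join(rows)
-- ===== Notes on version B (the rewrite author's own statement) =====
-- stated objective: alternative
-- what changed: A scans the layers front-to-back for every pixel with an early break inside a per-pixel loop; B instead paints the layers back-to-front into a flat buffer (topmost non-transparent pixel wins by being painted last) and joins the buffer into rows at the end.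
-- outside the precondition, e.g. on render_layers(1, 1, ['1', '']): A returns '*\n', B returns '\n'
import Mathlib
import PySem

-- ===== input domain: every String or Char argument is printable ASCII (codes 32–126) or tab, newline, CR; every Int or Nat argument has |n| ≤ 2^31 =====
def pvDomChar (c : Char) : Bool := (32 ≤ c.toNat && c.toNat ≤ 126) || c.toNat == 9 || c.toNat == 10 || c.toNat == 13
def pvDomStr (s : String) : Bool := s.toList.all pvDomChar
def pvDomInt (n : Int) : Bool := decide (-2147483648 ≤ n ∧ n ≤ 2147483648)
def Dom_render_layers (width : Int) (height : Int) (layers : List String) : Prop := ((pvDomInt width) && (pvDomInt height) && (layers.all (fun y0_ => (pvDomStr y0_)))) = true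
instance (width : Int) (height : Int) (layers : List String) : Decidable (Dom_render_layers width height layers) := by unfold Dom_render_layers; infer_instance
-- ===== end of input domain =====

-- B repaints a flat buffer back-to-front (topmost layer painted last) instead of
-- scanning the layers front-to-back for every pixel; objective: alternative decomposition.

-- ===== PORT A =====
-- the inner 'for layer in layers: …' with for-else: the first layer whose char is '0'/'1' decides
def pvScanA (pos : Int) : List String → String
  | [] => "?"                                -- the for-else branch
  | layer :: rest =>
    match PySem.Str.pyGet? layer pos with
    | some c =>
      if c = '0' then " "
      else if c = '1' then "*"
      else pvScanA pos rest                  -- '2' (or any other char) falls through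
    | none => pvScanA pos rest               -- Python raises IndexError here; excluded by Pre_

def render_layers (width : Int) (height : Int) (layers : List String) : String :=
  (PySem.List.pyRange 0 height 1).foldl
    (fun retval y =>
      ((PySem.List.pyRange 0 width 1).foldl
        (fun r x => r ++ pvScanA (y * width + x) layers) retval) ++ "\n")
    ""

-- ===== PORT B =====
-- one paint pass: B's list comprehension over zip(buf, layer)
def pvPaintB (buf : List Char) (layer : String) : List Char :=
  (buf.zip layer.toList).map
    (fun oc => if oc.2 = '0' then ' ' else if oc.2 = '1' then '*' else oc.1)

def render_layers_alt (width : Int) (height : Int) (layers : List String) : String :=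
  let n : Int := if 0 < width ∧ 0 < height then width * height else 0
  let buf : List Char := layers.reverse.foldl pvPaintB (List.replicate n.toNat '?')
  String.ofList ((PySem.List.pyRange 0 height 1).foldl
    (fun out y =>
      out ++ PySem.List.slice buf (some (y * width)) (some ((y + 1) * width)) ++ ['\n'])
    [])

-- ===== PRECONDITION & SPEC =====
-- Pre_ excludes the inputs on which the scan hits a position past a layer's end, where A raises
-- IndexError.  It is slightly narrower than A's exact domain: A also returns when a SHORT layer
-- is hidden behind earlier layers that decide every scanned pixel — which pixels are scanned is
-- an accident of A's early break, and B's value (painted from a truncated zip) differs there.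
def Pre_render_layers (width : Int) (height : Int) (layers : List String) : Prop :=
  0 < width → 0 < height → ∀ l ∈ layers, width * height ≤ (l.toList.length : Int)
instance (width : Int) (height : Int) (layers : List String) : Decidable (Pre_render_layers width height layers) := by unfold Pre_render_layers; infer_instance

def pvWitness_render_layers : Int × Int × List String := (2, 2, ["0112", "1210"])

def Spec_render_layers (width : Int) (height : Int) (layers : List String) (out : String) : Prop := out = render_layers_alt width height layers
instance (width : Int) (height : Int) (layers : List String) (out : String) : Decidable (Spec_render_layers width height layers out) := by unfold Spec_render_layers; infer_instance

-- ===== CLAIM (what is proved, stated in full; the proofs are below) =====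
def Claim_equal_render_layers : Prop := ∀ (width : Int) (height : Int) (layers : List String), Dom_render_layers width height layers → Pre_render_layers width height layers → Spec_render_layers width height layers (render_layers width height layers)

-- ===== LEMMAS AND PROOFS =====

-- the resolved pixel at position pos, with default `old` when no layer decides
def pvResD (pos : Int) (old : Char) : List String → Char
  | [] => old
  | layer :: rest =>
    match PySem.Str.pyGet? layer pos with
    | some c => if c = '0' then ' ' else if c = '1' then '*' else pvResD pos old rest
    | none => pvResD pos old rest

lemma pvScanA_toList (pos : Int) (layers : List String) :
    (pvScanA pos layers).toList = [pvResD pos '?' layers] := by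
  induction layers with
  | nil => simp only [pvScanA, pvResD]; decide
  | cons l rest ih =>
    simp only [pvScanA, pvResD]
    cases PySem.Str.pyGet? l pos with
    | none => exact ih
    | some c =>
      by_cases h0 : c = '0' <;> by_cases h1 : c = '1' <;> simp [h0, h1, ih]

lemma pvGetS (l : String) (i : Nat) (hi : i < l.toList.length) :
    PySem.Str.pyGet? l (i : Int) = some l.toList[i] := by
  simp [PySem.Str.pyGet?, PySem.List.pyGet?_natCast, List.getElem?_eq_getElem hi]

lemma pvPaintB_char (b : List Char) (l : String) (h : b.length ≤ l.toList.length) :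
    pvPaintB b l = b.mapIdx (fun p old =>
      match PySem.Str.pyGet? l (p : Int) with
      | some c => if c = '0' then ' ' else if c = '1' then '*' else old
      | none => old) := by
  have h' : b.length ≤ l.length := by simpa using h
  apply List.ext_getElem
  · simp [pvPaintB]; omega
  · intro i h1 h2
    have hb : i < b.length := by simpa using h2
    have hi : i < l.toList.length := by simp only [String.length_toList]; omega
    simp only [pvPaintB, List.getElem_map, List.getElem_zip, List.getElem_mapIdx,
      pvGetS l i hi]

lemma pvMapIdx_id (b : List Char) : b.mapIdx (fun _ x => x) = b := by
  apply List.ext_getElem <;> simp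

lemma pvPaint_fold (layers : List String) (b : List Char)
    (h : ∀ l ∈ layers, b.length ≤ l.toList.length) :
    layers.reverse.foldl pvPaintB b = b.mapIdx (fun p old => pvResD (p : Int) old layers) := by
  induction layers with
  | nil => simpa using (pvMapIdx_id b).symm
  | cons l rest ih =>
    simp only [List.reverse_cons, List.foldl_append, List.foldl_cons, List.foldl_nil]
    rw [ih (fun l' hl' => h l' (List.mem_cons_of_mem _ hl')),
      pvPaintB_char _ _ (by simpa using h l List.mem_cons_self),
      List.mapIdx_mapIdx]
    rfl

-- B's final buffer is the per-position resolve of A's scan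
lemma pvBuf_eq (layers : List String) (m : Nat)
    (h : ∀ l ∈ layers, m ≤ l.toList.length) :
    layers.reverse.foldl pvPaintB (List.replicate m '?') =
      (List.range m).map (fun (p : Nat) => pvResD (p : Int) '?' layers) := by
  rw [pvPaint_fold layers _ (by simpa using h)]
  apply List.ext_getElem
  · simp
  · intro i h1 h2
    simp only [List.getElem_mapIdx, List.getElem_replicate, List.getElem_map,
      List.getElem_range]

lemma pvStrFoldl (F : Int → String) (xs : List Int) (r : String) :
    (xs.foldl (fun r x => r ++ F x) r).toList
      = r.toList ++ xs.flatMap (fun x => (F x).toList) := by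
  induction xs generalizing r with
  | nil => simp
  | cons x xs ih => simp [ih, String.toList_append]

lemma pvSliceNil (a b : Int) : PySem.List.slice ([] : List Char) (some a) (some b) = [] := by
  simp [PySem.List.slice]

-- one output row: A's inner loop over x equals B's slice of the painted buffer
lemma pvRow_eq (width height y : Int) (layers : List String)
    (hpre : 0 < width → 0 < height → ∀ l ∈ layers, width * height ≤ (l.toList.length : Int))
    (hy0 : 0 ≤ y) (hyh : y < height) :
    (PySem.List.pyRange 0 width 1).flatMap
        (fun x => (pvScanA (y * width + x) layers).toList)
      = PySem.List.slice
          (layers.reverse.foldl pvPaintB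
            (List.replicate (if 0 < width ∧ 0 < height then width * height else 0).toNat '?'))
          (some (y * width)) (some ((y + 1) * width)) := by
  have hh : 0 < height := lt_of_le_of_lt hy0 hyh
  by_cases hw : 0 < width
  · have hn : (if 0 < width ∧ 0 < height then width * height else 0) = width * height := by
      simp [hw, hh]
    rw [hn]
    set m := (width * height).toNat with hm
    have hbuf := pvBuf_eq layers m (fun l hl => by
      have := hpre hw hh l hl; omega)
    rw [hbuf]
    have ha0 : 0 ≤ y * width := mul_nonneg hy0 (le_of_lt hw)
    have hb0 : 0 ≤ (y + 1) * width := mul_nonneg (by omega) (le_of_lt hw)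
    rw [PySem.List.slice_toNat _ ha0 hb0]
    set a := (y * width).toNat with hadef
    set t := width.toNat with htdef
    have hsplit : (y + 1) * width = y * width + width := by ring
    have hab : ((y + 1) * width).toNat - a = t := by omega
    have hatm : a + t ≤ m := by
      have : (y + 1) * width ≤ width * height := by
        have := mul_le_mul_of_nonneg_right (show y + 1 ≤ height by omega) (le_of_lt hw)
        linarith [this]
      omega
    rw [hab, ← List.map_drop, ← List.map_take]
    have hdrop : (List.range m).drop a = List.range' a (m - a) := by
      rw [List.range_eq_range', List.drop_range']; simp
    rw [hdrop, List.take_range'_of_length_ge (by omega), List.range'_eq_map_range]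
    rw [show (fun x => (pvScanA (y * width + x) layers).toList)
          = (fun x => [pvResD (y * width + x) '?' layers]) from
        funext fun x => pvScanA_toList _ _,
      ← List.map_eq_flatMap, PySem.List.pyRange_one]
    have hww : (width - 0).toNat = t := by omega
    rw [hww, List.map_map, List.map_map]
    apply List.map_congr_left
    intro k hk
    have hcast : ((a + k : Nat) : Int) = y * width + (0 + (k : Int)) := by
      push_cast; omega
    simp only [Function.comp]
    rw [← hcast]
  · have hn : (if 0 < width ∧ 0 < height then width * height else 0) = 0 := by
      simp [hw]
    rw [hn]
    have hb : layers.reverse.foldl pvPaintB (List.replicate (0 : Int).toNat '?') = [] := by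
      simpa using pvBuf_eq layers 0 (fun l _ => Nat.zero_le _)
    rw [hb, pvSliceNil, PySem.List.pyRange_one_eq_nil (by omega)]
    simp

-- ===== VERDICT (by name: the statement is the Claim_ definition above) =====
theorem render_layers_spec : Claim_equal_render_layers := by
  intro width height layers _ hpre
  unfold Pre_render_layers at hpre
  unfold Spec_render_layers render_layers render_layers_alt
  dsimp only
  apply String.toList_inj.mp
  have hnl : ("\n" : String).toList = ['\n'] := by decide
  have hinner : ∀ (r : String) (y : Int),
      ((PySem.List.pyRange 0 width 1).foldl
        (fun r x => r ++ pvScanA (y * width + x) layers) r) ++ "\n"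
      = r ++ (String.ofList ((PySem.List.pyRange 0 width 1).flatMap
            (fun x => (pvScanA (y * width + x) layers).toList)) ++ "\n") := by
    intro r y
    rw [← String.append_assoc]
    congr 1
    apply String.toList_inj.mp
    rw [pvStrFoldl]
    simp [String.toList_append, String.toList_ofList]
  have hstepA : ∀ (r : String) (y : Int), y ∈ PySem.List.pyRange 0 height 1 →
      ((PySem.List.pyRange 0 width 1).foldl
        (fun r x => r ++ pvScanA (y * width + x) layers) r) ++ "\n"
      = r ++ (String.ofList ((PySem.List.pyRange 0 width 1).flatMap
            (fun x => (pvScanA (y * width + x) layers).toList)) ++ "\n") :=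
    fun r y _ => hinner r y
  have hA : (PySem.List.pyRange 0 height 1).foldl
      (fun retval y => ((PySem.List.pyRange 0 width 1).foldl
        (fun r x => r ++ pvScanA (y * width + x) layers) retval) ++ "\n") ""
    = (PySem.List.pyRange 0 height 1).foldl
      (fun r y => r ++ (String.ofList ((PySem.List.pyRange 0 width 1).flatMap
        (fun x => (pvScanA (y * width + x) layers).toList)) ++ "\n")) "" :=
    PySem.List.foldl_congr_mem _ _ _ _ hstepA
  rw [hA, pvStrFoldl (fun y => String.ofList ((PySem.List.pyRange 0 width 1).flatMap
      (fun x => (pvScanA (y * width + x) layers).toList)) ++ "\n")]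
  have hstepB : ∀ (out : List Char) (y : Int), y ∈ PySem.List.pyRange 0 height 1 →
      out ++ PySem.List.slice
          (layers.reverse.foldl pvPaintB
            (List.replicate (if 0 < width ∧ 0 < height then width * height else 0).toNat '?'))
          (some (y * width)) (some ((y + 1) * width)) ++ ['\n']
      = out ++ (PySem.List.slice
          (layers.reverse.foldl pvPaintB
            (List.replicate (if 0 < width ∧ 0 < height then width * height else 0).toNat '?'))
          (some (y * width)) (some ((y + 1) * width)) ++ ['\n']) :=
    fun out y _ => List.append_assoc _ _ _
  have hB : (PySem.List.pyRange 0 height 1).foldl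
      (fun out y => out ++ PySem.List.slice
          (layers.reverse.foldl pvPaintB
            (List.replicate (if 0 < width ∧ 0 < height then width * height else 0).toNat '?'))
          (some (y * width)) (some ((y + 1) * width)) ++ ['\n']) []
    = (PySem.List.pyRange 0 height 1).foldl
      (fun out y => out ++ (PySem.List.slice
          (layers.reverse.foldl pvPaintB
            (List.replicate (if 0 < width ∧ 0 < height then width * height else 0).toNat '?'))
          (some (y * width)) (some ((y + 1) * width)) ++ ['\n'])) [] :=
    PySem.List.foldl_congr_mem _ _ _ _ hstepB
  rw [String.toList_ofList, hB, PySem.List.foldl_append_eq_flatMap]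
  rw [String.toList_ofList]
  apply List.flatMap_congr
  intro y hy
  rw [PySem.List.mem_pyRange_one] at hy
  rw [String.toList_append, String.toList_ofList, hnl,
    pvRow_eq width height y layers hpre hy.1 hy.2]
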